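-- pv_equiv track=rewrite | github.com/ShajahanAI/codewars | python/6 kyu/164.py | is_centered
-- ===== SOURCE A (Python) =====
-- def is_centered(xs: list[int], n: int) -> bool:
--     if len(xs) % 2 == 0 and n == 0:
--         return True
--
--     if len(xs) % 2 == 0:
--         end_idx = int(len(xs) / 2)
--         start_idx = end_idx - 1
--     else:
--         end_idx = len(xs) // 2
--         start_idx = end_idx
--
--
--     for _ in range(end_idx, len(xs)):
--         centered_sum = sum(xs[start_idx:end_idx+1])
--         if centered_sum == n:
--             return True
--
--         start_idx -= 1
--         end_idx += 1
--
--     return False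
-- ===== SOURCE B (Python) =====
-- def is_centered(xs: list[int], n: int) -> bool:
--     L = len(xs)
--     if L % 2 == 0 and n == 0:
--         return True
--     s = sum(xs)  # sum of the widest centered window xs[0:L]
--     for i in range((L + 1) // 2):
--         if s == n:
--             return True
--         # shrink the window by one element on each end
--         s -= xs[i] + xs[L - 1 - i]
--     return False
-- ===== Notes on version B (the rewrite author's own statement) =====
-- stated objective: faster
-- what changed: A re-sums every centered window from scratch with sum(xs[start:end+1]); B computes the full sum once and maintains the window sum incrementally, subtracting the two end elements as the window shrinks.
import Mathlib
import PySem

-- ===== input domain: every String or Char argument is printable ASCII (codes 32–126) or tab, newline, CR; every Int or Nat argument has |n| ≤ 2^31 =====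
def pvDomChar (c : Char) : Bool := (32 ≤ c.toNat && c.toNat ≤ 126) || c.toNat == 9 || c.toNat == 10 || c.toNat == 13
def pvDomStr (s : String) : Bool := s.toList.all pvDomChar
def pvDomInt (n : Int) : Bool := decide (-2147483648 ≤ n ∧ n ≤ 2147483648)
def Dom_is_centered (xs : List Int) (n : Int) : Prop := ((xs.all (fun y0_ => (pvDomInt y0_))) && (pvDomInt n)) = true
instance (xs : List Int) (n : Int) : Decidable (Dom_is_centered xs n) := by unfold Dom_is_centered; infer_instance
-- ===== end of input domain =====

-- B replaces A's re-summation of every centered window (O(n^2)) by one running window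
-- sum updated by subtracting the two ends (O(n)); objective: faster.

-- ===== PORT A =====
-- the loop 'for _ in range(end_idx, len(xs)) : …' of A, recursion on the remaining
-- iteration count, carrying (start_idx, end_idx); early 'return True' = returning true
def is_centered_aLoop (xs : List Int) (n : Int) : Nat → Int → Int → Bool
  | 0, _, _ => false
  | k + 1, s, e =>
    if (PySem.List.slice xs (some s) (some (e + 1))).sum = n then true
    else is_centered_aLoop xs n k (s - 1) (e + 1)

def is_centered (xs : List Int) (n : Int) : Bool :=
  if xs.length % 2 = 0 ∧ n = 0 then true
  else
    let L : Int := (xs.length : Int)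
    -- Python's int(len(xs)/2) (even branch): L is even and nonnegative, so the float
    -- division L/2 is exact and int(L/2) = L//2 = floordiv L 2, exactly.
    let endIdx : Int := if xs.length % 2 = 0 then PySem.Int.floordiv L 2 else PySem.Int.floordiv L 2
    let startIdx : Int := if xs.length % 2 = 0 then endIdx - 1 else endIdx
    is_centered_aLoop xs n (L - endIdx).toNat startIdx endIdx

-- ===== PORT B =====
-- the loop 'for i in range((L+1)//2): …' of B, recursion on the remaining iteration
-- count, carrying i and the running window sum s; xs[i], xs[L-1-i] are always in range
-- on the iterations reached (pyGetD's default is never used)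
def is_centered_bLoop (xs : List Int) (n : Int) : Nat → Int → Int → Bool
  | 0, _, _ => false
  | k + 1, i, s =>
    if s = n then true
    else is_centered_bLoop xs n k (i + 1)
      (s - (PySem.List.pyGetD xs i 0 + PySem.List.pyGetD xs ((xs.length : Int) - 1 - i) 0))

def is_centered_alt (xs : List Int) (n : Int) : Bool :=
  if xs.length % 2 = 0 ∧ n = 0 then true
  else is_centered_bLoop xs n ((xs.length + 1) / 2) 0 xs.sum

-- ===== PRECONDITION & SPEC =====
def Spec_is_centered (xs : List Int) (n : Int) (out : Bool) : Prop := out = is_centered_alt xs n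
instance (xs : List Int) (n : Int) (out : Bool) : Decidable (Spec_is_centered xs n out) := by unfold Spec_is_centered; infer_instance

-- ===== CLAIM (what is proved, stated in full; the proofs are below) =====
def Claim_equal_is_centered : Prop := ∀ (xs : List Int) (n : Int), Dom_is_centered xs n → Spec_is_centered xs n (is_centered xs n)

-- ===== LEMMAS AND PROOFS =====

-- one-step unfoldings of the two loops (rfl; avoids simp unfolding repeatedly)
lemma aLoop_zero (xs : List Int) (n : Int) (s e : Int) :
    is_centered_aLoop xs n 0 s e = false := rfl

lemma aLoop_succ (xs : List Int) (n : Int) (k : Nat) (s e : Int) :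
    is_centered_aLoop xs n (k + 1) s e
      = if (PySem.List.slice xs (some s) (some (e + 1))).sum = n then true
        else is_centered_aLoop xs n k (s - 1) (e + 1) := rfl

lemma bLoop_succ (xs : List Int) (n : Int) (k : Nat) (i s : Int) :
    is_centered_bLoop xs n (k + 1) i s
      = if s = n then true
        else is_centered_bLoop xs n k (i + 1)
          (s - (PySem.List.pyGetD xs i 0 + PySem.List.pyGetD xs ((xs.length : Int) - 1 - i) 0)) := rfl

-- the sum of the centered window with i elements cut off each end
def ctrW (xs : List Int) (i : Nat) : Int :=
  (PySem.List.slice xs (some (i : Int)) (some ((xs.length : Int) - i))).sum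

lemma ctrW_eq_drop_take (xs : List Int) (i : Nat) (h : i ≤ xs.length) :
    ctrW xs i = ((xs.drop i).take (xs.length - 2 * i)).sum := by
  unfold ctrW
  rw [PySem.List.slice_toNat xs (by positivity) (by omega)]
  have h1 : ((i : Int)).toNat = i := Int.toNat_natCast i
  have h2 : (((xs.length : Int)) - i).toNat = xs.length - i := by omega
  rw [h1, h2]
  have h3 : xs.length - i - i = xs.length - 2 * i := by omega
  rw [h3]

lemma ctrW_zero (xs : List Int) : ctrW xs 0 = xs.sum := by
  rw [ctrW_eq_drop_take xs 0 (by omega)]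
  simp

-- the slice A takes at start index i (end index length-1-i) is the window ctrW i
lemma slice_arg (xs : List Int) (i : Nat) :
    (PySem.List.slice xs (some (i : Int)) (some ((xs.length : Int) - 1 - i + 1))).sum
      = ctrW xs i := by
  unfold ctrW
  have : ((xs.length : Int) - 1 - i + 1) = ((xs.length : Int) - i) := by ring
  rw [this]

lemma ctrW_shrink (xs : List Int) (i : Nat) (h : 2 * i + 2 ≤ xs.length) :
    ctrW xs (i + 1)
      = ctrW xs i - (PySem.List.pyGetD xs (i : Int) 0
                     + PySem.List.pyGetD xs ((xs.length : Int) - 1 - i) 0) := by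
  rw [ctrW_eq_drop_take xs i (by omega), ctrW_eq_drop_take xs (i + 1) (by omega)]
  have hi : i < xs.length := by omega
  have hj : xs.length - 1 - i < xs.length := by omega
  rw [PySem.List.pyGetD_of_nonneg xs 0 (show (0:Int) ≤ (i : Int) by positivity),
      PySem.List.pyGetD_of_nonneg xs 0 (show (0:Int) ≤ (xs.length : Int) - 1 - i by omega)]
  have hc1 : ((i : Int)).toNat = i := Int.toNat_natCast i
  have hc2 : ((xs.length : Int) - 1 - (i : Int)).toNat = xs.length - 1 - i := by omega
  rw [hc1, hc2]
  -- peel the head element of the window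
  have hdrop : xs.drop i = xs.getD i 0 :: xs.drop (i + 1) := by
    rw [List.getD_eq_getElem xs 0 hi]
    exact List.drop_eq_getElem_cons hi
  rw [hdrop, show xs.length - 2 * i = (xs.length - 2 * i - 1) + 1 by omega, List.take_succ_cons]
  -- peel the last element of the remaining window
  have hidx : xs.length - 2 * (i + 1) < (xs.drop (i + 1)).length := by
    simp only [List.length_drop]; omega
  rw [show xs.length - 2 * i - 1 = (xs.length - 2 * (i + 1)) + 1 by omega,
      List.take_add_one, List.getElem?_eq_getElem hidx]
  have hget : (xs.drop (i + 1))[xs.length - 2 * (i + 1)] = xs.getD (xs.length - 1 - i) 0 := by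
    rw [List.getElem_drop, ← List.getD_eq_getElem xs 0 (by omega : i + 1 + (xs.length - 2 * (i + 1)) < xs.length)]
    rw [show i + 1 + (xs.length - 2 * (i + 1)) = xs.length - 1 - i from by omega]
  rw [hget]
  simp only [List.sum_cons, List.sum_append, List.sum_cons, List.sum_nil, Option.toList_some]
  ring

-- characterisation of A's loop: starting at start index i (with the invariant
-- end = length - 1 - i) and i+1 remaining iterations, it reports whether some
-- centered window with at most i elements cut off each end sums to n
lemma aLoop_eq (xs : List Int) (n : Int) (i : Nat) :
    is_centered_aLoop xs n (i + 1) (i : Int) ((xs.length : Int) - 1 - i)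
      = decide (∃ j, j ≤ i ∧ ctrW xs j = n) := by
  induction i with
  | zero =>
    rw [aLoop_succ, slice_arg xs 0, aLoop_zero]
    by_cases h : ctrW xs 0 = n
    · simp [h]
    · rw [if_neg h]
      symm
      simp only [decide_eq_false_iff_not]
      rintro ⟨j, hj, hw⟩
      have : j = 0 := by omega
      exact h (this ▸ hw)
  | succ i ih =>
    rw [aLoop_succ, slice_arg xs (i + 1)]
    by_cases h : ctrW xs (i + 1) = n
    · simp only [if_pos h, true_eq_decide_iff]
      exact ⟨i + 1, le_refl _, h⟩
    · rw [if_neg h,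
          show ((i + 1 : Nat) : Int) - 1 = (i : Int) by push_cast; ring,
          show (xs.length : Int) - 1 - ((i + 1 : Nat) : Int) + 1 = (xs.length : Int) - 1 - (i : Int) by push_cast; ring,
          ih, decide_eq_decide]
      constructor
      · rintro ⟨j, hj, hw⟩; exact ⟨j, by omega, hw⟩
      · rintro ⟨j, hj, hw⟩
        rcases Nat.lt_or_ge j (i + 1) with hlt | hge
        · exact ⟨j, by omega, hw⟩
        · have : j = i + 1 := by omega
          exact absurd (this ▸ hw) h

-- characterisation of B's loop: with a correct running window sum and enough
-- room for k iterations, it reports whether one of the next k windows sums to n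
lemma bLoop_eq (xs : List Int) (n : Int) (k i : Nat)
    (hk : 2 * (i + k) ≤ xs.length + 1) :
    is_centered_bLoop xs n k (i : Int) (ctrW xs i)
      = decide (∃ j, j < k ∧ ctrW xs (i + j) = n) := by
  induction k generalizing i with
  | zero => simp [is_centered_bLoop]
  | succ k ih =>
    rw [bLoop_succ]
    by_cases h : ctrW xs i = n
    · simp only [if_pos h, true_eq_decide_iff]
      exact ⟨0, by omega, by simpa using h⟩
    · rw [if_neg h]
      cases k with
      | zero =>
        simp only [is_centered_bLoop]
        symm
        simp only [decide_eq_false_iff_not]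
        rintro ⟨j, hj, hw⟩
        have : j = 0 := by omega
        subst this
        exact h (by simpa using hw)
      | succ k =>
        rw [← ctrW_shrink xs i (by omega),
            show (i : Int) + 1 = ((i + 1 : Nat) : Int) by push_cast; ring,
            ih (i + 1) (by omega), decide_eq_decide]
        constructor
        · rintro ⟨j, hj, hw⟩
          exact ⟨j + 1, by omega, by rw [show i + (j + 1) = i + 1 + j from by omega]; exact hw⟩
        · rintro ⟨j, hj, hw⟩
          cases j with
          | zero => exact absurd (by simpa using hw) h
          | succ j => exact ⟨j, by omega, by rw [show i + 1 + j = i + (j + 1) from by omega]; exact hw⟩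

-- ===== VERDICT (by name: the statement is the Claim_ definition above) =====
theorem is_centered_spec : Claim_equal_is_centered := by
  intro xs n _
  unfold Spec_is_centered is_centered is_centered_alt
  by_cases hb : xs.length % 2 = 0 ∧ n = 0
  · simp [hb]
  · rw [if_neg hb, if_neg hb]
    rcases Nat.eq_zero_or_pos xs.length with h0 | hpos
    · -- empty list: both loops run zero iterations
      simp only [h0]
      norm_num
      rfl
    · have he : PySem.Int.floordiv ((xs.length : Int)) 2 = ((xs.length / 2 : Nat) : Int) :=
        PySem.Int.floordiv_natCast xs.length 2
      simp only [he, ite_self]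
      set L := xs.length with hL
      -- the common start index: L/2 for odd L, L/2 - 1 for even L (L ≥ 1 here)
      set i0 : Nat := if L % 2 = 0 then L / 2 - 1 else L / 2 with hi0
      have hpar : L % 2 = 0 ∨ L % 2 = 1 := by omega
      have hfuel : ((L : Int) - ((L / 2 : Nat) : Int)).toNat = i0 + 1 := by
        rcases hpar with h2 | h2 <;> · simp only [hi0, h2]; norm_num; try omega
      have hstart : (if L % 2 = 0 then ((L / 2 : Nat) : Int) - 1 else ((L / 2 : Nat) : Int)) = (i0 : Int) := by
        rcases hpar with h2 | h2 <;> · simp only [hi0, h2]; norm_num; try omega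
      have hend : ((L / 2 : Nat) : Int) = (L : Int) - 1 - (i0 : Int) := by
        rcases hpar with h2 | h2 <;> · simp only [hi0, h2]; norm_num; try omega
      rw [hfuel, hstart, hend, aLoop_eq xs n i0,
          ← ctrW_zero xs, show (0 : Int) = ((0 : Nat) : Int) from rfl,
          bLoop_eq xs n ((L + 1) / 2) 0 (by omega), decide_eq_decide]
      have hcnt : ∀ j : Nat, j ≤ i0 ↔ j < (L + 1) / 2 := by
        intro j
        rcases hpar with h2 | h2 <;> · simp only [hi0, h2]; norm_num; try omega
      constructor
      · rintro ⟨j, hj, hw⟩; exact ⟨j, (hcnt j).mp hj, by simpa using hw⟩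
      · rintro ⟨j, hj, hw⟩; exact ⟨j, (hcnt j).mpr hj, by simpa using hw⟩
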